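-- pv_equiv track=rewrite | github.com/Barogthor/CryptoDES | src/main.py | remove_bit_control
-- ===== SOURCE A (Python) =====
-- def remove_bit_control(key=None):
--     if key is None:
--         raise Exception("key is empty")
--     new_key = []
--     for i in range(0, len(key)):
--         if i % 8 != 0 and i != 0:
--             new_key.append(key[i])
--     return new_key
-- ===== SOURCE B (Python) =====
-- def remove_bit_control(key=None):
--     if key is None:
--         raise Exception("key is empty")
--     new_key = []
--     pos = 0
--     while pos < len(key):
--         new_key += key[pos + 1:pos + 8]
--         pos += 8
--     return new_key
-- ===== Notes on version B (the rewrite author's own statement) =====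
-- stated objective: alternative
-- what changed: B keeps no per-index test: a while loop advances a cursor 8 at a time and appends the slice key[pos+1:pos+8] of each block (the block minus its control bit), so the per-element i % 8 check and append disappear into block slicing.
import Mathlib
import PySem

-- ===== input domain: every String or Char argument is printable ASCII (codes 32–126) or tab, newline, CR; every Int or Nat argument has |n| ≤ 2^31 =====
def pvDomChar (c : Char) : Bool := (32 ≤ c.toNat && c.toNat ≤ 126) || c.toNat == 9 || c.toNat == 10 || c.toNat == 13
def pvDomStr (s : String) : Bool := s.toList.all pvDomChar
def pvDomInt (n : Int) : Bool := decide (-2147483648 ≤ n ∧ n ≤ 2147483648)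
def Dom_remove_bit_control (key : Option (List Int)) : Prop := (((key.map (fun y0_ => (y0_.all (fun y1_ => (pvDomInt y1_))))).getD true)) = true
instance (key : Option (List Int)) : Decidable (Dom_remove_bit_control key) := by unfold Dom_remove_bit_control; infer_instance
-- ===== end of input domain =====

-- B replaces A's indexed scan with a modulus test by a while loop that consumes the key head-first, appending rest[1:8] and shrinking rest to rest[8:]; alternative decomposition, equal output.


-- ===== PORT A =====
-- 'raise Exception("key is empty")' on key=None: that input is excluded by Pre_; the match arm returns [] there.
def remove_bit_control (key : Option (List Int)) : List Int :=
  match key with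
  | none => []
  | some k =>
    (PySem.List.pyRange 0 (PySem.List.len k) 1).foldl
      (fun new_key i =>
        if i % 8 ≠ 0 ∧ i ≠ 0 then new_key ++ [PySem.List.pyGetD k i 0] else new_key) []

-- ===== PORT B =====
-- pos = 0; while pos < len(key): new_key += key[pos+1:pos+8]; pos += 8
def rbcLoop (k new_key : List Int) (pos : Int) : List Int :=
  if h : pos < PySem.List.len k then
    rbcLoop k (new_key ++ PySem.List.slice k (some (pos + 1)) (some (pos + 8))) (pos + 8)
  else new_key
termination_by (PySem.List.len k - pos).toNat
decreasing_by
  simp only [PySem.List.len] at h ⊢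
  omega

def remove_bit_control_alt (key : Option (List Int)) : List Int :=
  match key with
  | none => []
  | some k => rbcLoop k [] 0

-- ===== PRECONDITION & SPEC =====
-- Pre_ excludes only key=None, on which the Python A (and B) raises Exception("key is empty").
def Pre_remove_bit_control (key : Option (List Int)) : Prop := key ≠ none
instance (key : Option (List Int)) : Decidable (Pre_remove_bit_control key) := by unfold Pre_remove_bit_control; infer_instance
def pvWitness_remove_bit_control : Option (List Int) := some [3, 1, 4, 1, 5, 9, 2, 6, 5, 3]
def Spec_remove_bit_control (key : Option (List Int)) (out : List Int) : Prop := out = remove_bit_control_alt key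
instance (key : Option (List Int)) (out : List Int) : Decidable (Spec_remove_bit_control key out) := by unfold Spec_remove_bit_control; infer_instance

-- ===== CLAIM (what is proved, stated in full; the proofs are below) =====
def Claim_equal_remove_bit_control : Prop := ∀ (key : Option (List Int)), Dom_remove_bit_control key → Pre_remove_bit_control key → Spec_remove_bit_control key (remove_bit_control key)


-- ===== LEMMAS AND PROOFS =====

-- canonical Nat-indexed form of A's filtered scan
def pvL (k : List Int) : List Int :=
  ((List.range k.length).filter (fun j => decide (j % 8 ≠ 0))).map (fun j => k.getD j 0)

lemma pv_getD_drop (k : List Int) (a j : ℕ) :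
    (k.drop a).getD j 0 = k.getD (a + j) 0 := by
  simp [List.getD_eq_getElem?_getD, List.getElem?_drop]

lemma pv_seg (k : List Int) (a m : ℕ) (h : a + m ≤ k.length) :
    (List.range m).map (fun j => k.getD (a + j) 0) = (k.drop a).take m := by
  apply List.ext_getElem
  · simp; omega
  · intro i h1 h2
    have hik : a + i < k.length := by simp at h1; omega
    simp [List.getD_eq_getElem?_getD, List.getElem?_eq_getElem hik]

lemma pvL_step (k : List Int) (hk : k ≠ []) :
    pvL k = (k.drop 1).take 7 ++ pvL (k.drop 8) := by
  have hn : 1 ≤ k.length := List.length_pos_iff.mpr hk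
  by_cases h8 : k.length ≤ 8
  · -- one (possibly ragged) block
    have hd8 : k.drop 8 = [] := by
      apply List.eq_nil_of_length_eq_zero; simp; omega
    have hsplit : k.length = 1 + (k.length - 1) := by omega
    unfold pvL
    rw [hsplit, List.range_add, List.filter_append, List.map_append]
    have h0 : (List.range 1).filter (fun j => decide (j % 8 ≠ 0)) = [] := by decide
    rw [h0, List.filter_map]
    have hid : (List.range (k.length - 1)).filter
          ((fun j => decide (j % 8 ≠ 0)) ∘ (fun x => 1 + x))
        = List.range (k.length - 1) := by
      apply List.filter_eq_self.mpr
      intro j hj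
      simp only [List.mem_range] at hj
      simp only [Function.comp_apply, decide_eq_true_eq]
      omega
    rw [hid, List.map_map, hd8]
    have hseg : (List.range (k.length - 1)).map (fun j => k.getD (1 + j) 0)
        = (k.drop 1).take (k.length - 1) := pv_seg k 1 (k.length - 1) (by omega)
    have hlen1 : (k.drop 1).length = k.length - 1 := by simp
    have htake : (k.drop 1).take 7 = (k.drop 1).take (k.length - 1) := by
      rw [List.take_of_length_le (by omega), List.take_of_length_le (by omega)]
    show [] ++ _ = _ ++ pvL []
    rw [show pvL [] = [] from rfl, List.append_nil, List.nil_append, htake, ← hseg]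
    rfl
  · -- full first block of 8, then the rest
    have hsplit : k.length = 8 + (k.length - 8) := by omega
    have hlen8 : (k.drop 8).length = k.length - 8 := by simp
    unfold pvL
    rw [hsplit, List.range_add, List.filter_append, List.map_append]
    congr 1
    · have h0 : (List.range 8).filter (fun j => decide (j % 8 ≠ 0))
          = (List.range 7).map (fun j => 1 + j) := by decide
      rw [h0, List.map_map]
      exact pv_seg k 1 7 (by omega)
    · rw [List.filter_map, List.map_map]
      have hcond : (List.range (k.length - 8)).filter
            ((fun j => decide (j % 8 ≠ 0)) ∘ (fun x => 8 + x))
          = (List.range (k.length - 8)).filter (fun j => decide (j % 8 ≠ 0)) := by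
        apply List.filter_congr
        intro j _
        simp only [Function.comp_apply, decide_eq_decide]
        omega
      rw [hcond, hlen8.symm]
      apply List.map_congr_left
      intro j _
      simp only [Function.comp_apply]
      rw [pv_getD_drop]

lemma pvA_eq_L (k : List Int) : remove_bit_control (some k) = pvL k := by
  show (PySem.List.pyRange 0 (PySem.List.len k) 1).foldl _ [] = _
  rw [PySem.List.foldl_append_ite (p := fun i : ℤ => i % 8 ≠ 0 ∧ i ≠ 0)]
  rw [PySem.List.pyRange_one, List.filter_map, List.map_map]
  have hcnt : ((PySem.List.len k : ℤ) - 0).toNat = k.length := by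
    simp [PySem.List.len]
  rw [hcnt, List.nil_append]
  unfold pvL
  have hfil : (List.range k.length).filter
        ((fun i : ℤ => decide (i % 8 ≠ 0 ∧ i ≠ 0)) ∘ (fun j : ℕ => (0 : ℤ) + ↑j))
      = (List.range k.length).filter (fun j => decide (j % 8 ≠ 0)) := by
    apply List.filter_congr
    intro j _
    simp only [Function.comp_apply, zero_add, decide_eq_decide]
    omega
  rw [hfil]
  apply List.map_congr_left
  intro j _
  simp only [Function.comp_apply, zero_add]
  rw [PySem.List.pyGetD_of_nonneg _ _ (by positivity), Int.toNat_natCast]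

lemma pv_loop : ∀ (n : ℕ) (k acc : List Int) (t : ℕ),
    (k.drop (8 * t)).length ≤ n → rbcLoop k acc ((8 * t : ℕ) : Int) = acc ++ pvL (k.drop (8 * t)) := by
  intro n
  induction n with
  | zero =>
    intro k acc t hk
    have hnil : k.drop (8 * t) = [] := List.eq_nil_of_length_eq_zero (by omega)
    have hlen : k.length ≤ 8 * t := by
      have := List.length_drop (l := k) (i := 8 * t); omega
    rw [rbcLoop.eq_def]
    have hcond : ¬ ((8 * t : ℕ) : Int) < PySem.List.len k := by
      simp only [PySem.List.len]; exact_mod_cast not_lt.mpr (by exact_mod_cast hlen)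
    rw [dif_neg hcond]
    simp [hnil, pvL]
  | succ n ih =>
    intro k acc t hk
    rcases eq_or_ne (k.drop (8 * t)) [] with hnil | hne
    · have hlen : k.length ≤ 8 * t := by
        have h0 : (k.drop (8 * t)).length = 0 := by rw [hnil]; rfl
        simp only [List.length_drop] at h0; omega
      rw [rbcLoop.eq_def]
      have hcond : ¬ ((8 * t : ℕ) : Int) < PySem.List.len k := by
        simp only [PySem.List.len]; exact_mod_cast not_lt.mpr (by exact_mod_cast hlen)
      rw [dif_neg hcond]
      simp [hnil, pvL]
    · have hlt : 8 * t < k.length := by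
        have := List.length_pos_iff.mpr hne
        simp only [List.length_drop] at this; omega
      rw [rbcLoop.eq_def]
      have hcond : ((8 * t : ℕ) : Int) < PySem.List.len k := by
        simp only [PySem.List.len]; exact_mod_cast hlt
      rw [dif_pos hcond]
      have e1 : ((8 * t : ℕ) : Int) + 1 = ((8 * t + 1 : ℕ) : Int) := by push_cast; ring
      have e2 : ((8 * t : ℕ) : Int) + 8 = ((8 * t + 8 : ℕ) : Int) := by push_cast; ring
      have e3 : ((8 * t : ℕ) : Int) + 8 = ((8 * (t + 1) : ℕ) : Int) := by push_cast; ring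
      have hs : PySem.List.slice k (some (((8 * t : ℕ) : Int) + 1)) (some (((8 * t : ℕ) : Int) + 8))
          = (k.drop (8 * t + 1)).take 7 := by
        rw [e1, e2, PySem.List.slice_natCast,
          show (8 * t + 8) - (8 * t + 1) = 7 from by omega]
      rw [hs, e3, ih k _ (t + 1) (by simp only [List.length_drop] at hk ⊢; omega)]
      rw [pvL_step _ hne]
      have d1 : (k.drop (8 * t)).drop 1 = k.drop (8 * t + 1) := by
        rw [List.drop_drop]
      have d8 : (k.drop (8 * t)).drop 8 = k.drop (8 * (t + 1)) := by
        rw [List.drop_drop, show 8 * t + 8 = 8 * (t + 1) from by ring]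
      rw [d1, d8, List.append_assoc]

-- ===== VERDICT (by name: the statement is the Claim_ definition above) =====
theorem remove_bit_control_spec : Claim_equal_remove_bit_control := by
  intro key _ hpre
  match key with
  | none => exact absurd rfl hpre
  | some k =>
    show remove_bit_control (some k) = remove_bit_control_alt (some k)
    rw [pvA_eq_L]
    show pvL k = rbcLoop k [] 0
    have h0 : (0 : Int) = ((8 * 0 : ℕ) : Int) := by norm_num
    rw [h0, pv_loop (k.drop (8 * 0)).length k [] 0 le_rfl]
    simp
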